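-- pv_equiv track=rewrite | github.com/arsenelupin0/BignessLeague-DiscordBot | src/bigness_league_bot/infrastructure/discord/team_role_assignment.py | _normalize_team_staff_role_name
-- ===== SOURCE A (Python) =====
-- import unicodedata
--
-- TEAM_STAFF_ROLE_MANAGER_ALIASES = {"manager"}
--
-- TEAM_STAFF_ROLE_SECOND_MANAGER_ALIASES = {"segundo manager"}
--
-- TEAM_STAFF_ROLE_CEO = "ceo"
--
-- TEAM_STAFF_ROLE_COACH_ALIASES = {"coach"}
--
-- TEAM_STAFF_ROLE_ANALYST_ALIASES = {"analista"}
--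
-- TEAM_STAFF_ROLE_CAPTAIN_ALIASES = {"capitan", "captain"}
--
-- TEAM_STAFF_ROLE_MANAGER = "manager"
--
-- TEAM_STAFF_ROLE_SECOND_MANAGER = "second_manager"
--
-- TEAM_STAFF_ROLE_COACH = "coach"
--
-- TEAM_STAFF_ROLE_ANALYST = "analyst"
--
-- TEAM_STAFF_ROLE_CAPTAIN = "captain"
--
-- def _normalize_member_lookup_text(value: str | None) -> str:
--     if value is None:
--         return ""
--
--     normalized = " ".join(str(value).split()).strip()
--     if normalized.startswith("@"):
--         normalized = normalized[1:]
--     normalized = unicodedata.normalize("NFKC", normalized).casefold()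
--     return normalized
--
-- def _normalize_team_staff_role_name(role_name: str | None) -> str | None:
--     normalized_role_name = _normalize_member_lookup_text(role_name)
--     if not normalized_role_name:
--         return None
--     normalized_role_name = "".join(
--         character
--         for character in unicodedata.normalize("NFKD", normalized_role_name)
--         if not unicodedata.combining(character)
--     )
--     if normalized_role_name == TEAM_STAFF_ROLE_CEO:
--         return TEAM_STAFF_ROLE_CEO
--     if normalized_role_name in TEAM_STAFF_ROLE_ANALYST_ALIASES:
--         return TEAM_STAFF_ROLE_ANALYST
--     if normalized_role_name in TEAM_STAFF_ROLE_COACH_ALIASES: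
--         return TEAM_STAFF_ROLE_COACH
--     if normalized_role_name in TEAM_STAFF_ROLE_SECOND_MANAGER_ALIASES:
--         return TEAM_STAFF_ROLE_SECOND_MANAGER
--     if normalized_role_name in TEAM_STAFF_ROLE_MANAGER_ALIASES:
--         return TEAM_STAFF_ROLE_MANAGER
--     if normalized_role_name in TEAM_STAFF_ROLE_CAPTAIN_ALIASES:
--         return TEAM_STAFF_ROLE_CAPTAIN
--     return None
-- ===== SOURCE B (Python) =====
-- import unicodedata
--
-- # Alias table sorted by alias (ASCII order); looked up by binary search.
-- _STAFF_ROLE_TABLE = [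
--     ("analista", "analyst"),
--     ("capitan", "captain"),
--     ("captain", "captain"),
--     ("ceo", "ceo"),
--     ("coach", "coach"),
--     ("manager", "manager"),
--     ("segundo manager", "second_manager"),
-- ]
--
--
-- def _lookup_staff_role(alias):
--     lo, hi = 0, len(_STAFF_ROLE_TABLE)
--     while lo < hi:
--         mid = (lo + hi) // 2
--         if _STAFF_ROLE_TABLE[mid][0] < alias:
--             lo = mid + 1
--         else:
--             hi = mid
--     if lo < len(_STAFF_ROLE_TABLE) and _STAFF_ROLE_TABLE[lo][0] == alias:
--         return _STAFF_ROLE_TABLE[lo][1]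
--     return None
--
--
-- def _normalize_member_lookup_text(value):
--     if value is None:
--         return ""
--     normalized = " ".join(str(value).split()).strip()
--     if normalized.startswith("@"):
--         normalized = normalized[1:]
--     normalized = unicodedata.normalize("NFKC", normalized).casefold()
--     return normalized
--
--
-- def _normalize_team_staff_role_name(role_name):
--     normalized_role_name = _normalize_member_lookup_text(role_name)
--     if not normalized_role_name:
--         return None
--     normalized_role_name = "".join(
--         character
--         for character in unicodedata.normalize("NFKD", normalized_role_name)
--         if not unicodedata.combining(character)
--     )
--     return _lookup_staff_role(normalized_role_name)
-- ===== Notes on version B (the rewrite author's own statement) =====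
-- stated objective: alternative
-- what changed: The six-branch if/elif alias cascade is replaced by a sorted alias-to-canonical table searched with a hand-written binary search (bisect-left then one equality check); correct because the alias sets are pairwise disjoint, so any lookup that finds the unique matching alias reproduces the cascade.
import Mathlib
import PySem

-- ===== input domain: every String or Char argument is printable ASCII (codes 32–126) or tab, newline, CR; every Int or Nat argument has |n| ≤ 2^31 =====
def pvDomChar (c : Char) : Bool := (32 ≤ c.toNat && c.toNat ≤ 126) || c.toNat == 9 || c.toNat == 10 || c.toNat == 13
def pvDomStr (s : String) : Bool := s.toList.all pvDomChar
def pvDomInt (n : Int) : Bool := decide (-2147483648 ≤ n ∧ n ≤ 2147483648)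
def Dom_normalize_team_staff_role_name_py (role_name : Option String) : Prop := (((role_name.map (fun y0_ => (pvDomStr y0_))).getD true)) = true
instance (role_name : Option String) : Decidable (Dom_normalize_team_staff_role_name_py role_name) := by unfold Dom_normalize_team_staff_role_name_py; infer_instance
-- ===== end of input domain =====

-- B replaces A's six-branch alias cascade with a sorted alias table searched by a
-- hand-written binary search (bisect-left, then one equality check); objective: alternative.

-- ===== PORT A =====
-- unicodedata.combining(c) = 0 for every ASCII character, so on Dom the NFKD
-- comprehension's filter predicate is constantly false (exact on Dom).
def pvCombining (_ : Char) : Bool := false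

-- _normalize_member_lookup_text; on Dom (printable ASCII + tab/newline/CR)
-- NFKC normalization is the identity and casefold coincides with lower (exact on Dom).
def pv_normalize_member_lookup_text (value : Option String) : List Char :=
  match value with
  | none => []
  | some v =>
    let normalized := PySem.Chars.strip (PySem.Chars.join [' '] (PySem.Chars.split₀ v.toList))
    let normalized := if PySem.Chars.startswith normalized ['@'] then PySem.Chars.slice normalized (some 1) none else normalized
    PySem.Chars.lower normalized

def normalize_team_staff_role_name_py (role_name : Option String) : Option String :=
  let n0 := pv_normalize_member_lookup_text role_name
  if n0 = [] then none
  else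
    -- NFKD is the identity on ASCII (exact on Dom); the comprehension drops combining characters
    let n := n0.filter (fun c => !pvCombining c)
    if n = "ceo".toList then some "ceo"
    else if n = "analista".toList then some "analyst"
    else if n = "coach".toList then some "coach"
    else if n = "segundo manager".toList then some "second_manager"
    else if n = "manager".toList then some "manager"
    else if n = "capitan".toList ∨ n = "captain".toList then some "captain"
    else none

-- ===== PORT B =====
-- _STAFF_ROLE_TABLE, sorted by alias (ASCII order)
def pvStaffTable : List (List Char × String) :=
  [("analista".toList, "analyst"), ("capitan".toList, "captain"), ("captain".toList, "captain"),
   ("ceo".toList, "ceo"), ("coach".toList, "coach"), ("manager".toList, "manager"),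
   ("segundo manager".toList, "second_manager")]

-- Python's '<' on strings: lexicographic on code points (exact on ASCII)
def pvStrLt : List Char → List Char → Bool
  | _, [] => false
  | [], _ :: _ => true
  | a :: as_, b :: bs => if a.toNat < b.toNat then true else if b.toNat < a.toNat then false else pvStrLt as_ bs

-- the while-loop of _lookup_staff_role; fuel = table length bounds the iterations
-- (hi - lo at least halves each step, so pvStaffTable.length iterations always suffice)
def pvBisectAux : Nat → List Char → Nat → Nat → Nat
  | 0, _, lo, _ => lo
  | fuel + 1, alias_, lo, hi =>
    if lo < hi then
      let mid := (lo + hi) / 2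
      if pvStrLt (pvStaffTable.getD mid ([], "")).1 alias_ then pvBisectAux fuel alias_ (mid + 1) hi
      else pvBisectAux fuel alias_ lo mid
    else lo

def pv_lookup_staff_role (alias_ : List Char) : Option String :=
  let lo := pvBisectAux pvStaffTable.length alias_ 0 pvStaffTable.length
  if lo < pvStaffTable.length then
    let entry := pvStaffTable.getD lo ([], "")
    if entry.1 = alias_ then some entry.2 else none
  else none

def normalize_team_staff_role_name_py_alt (role_name : Option String) : Option String :=
  let n0 := pv_normalize_member_lookup_text role_name
  if n0 = [] then none
  else
    let n := n0.filter (fun c => !pvCombining c)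
    pv_lookup_staff_role n

-- ===== PRECONDITION & SPEC =====
def Spec_normalize_team_staff_role_name_py (role_name : Option String) (out : Option String) : Prop := out = normalize_team_staff_role_name_py_alt role_name
instance (role_name : Option String) (out : Option String) : Decidable (Spec_normalize_team_staff_role_name_py role_name out) := by unfold Spec_normalize_team_staff_role_name_py; infer_instance

-- ===== CLAIM (what is proved, stated in full; the proofs are below) =====
def Claim_equal_normalize_team_staff_role_name_py : Prop := ∀ (role_name : Option String), Dom_normalize_team_staff_role_name_py role_name → Spec_normalize_team_staff_role_name_py role_name (normalize_team_staff_role_name_py role_name)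

-- ===== LEMMAS AND PROOFS =====
set_option maxHeartbeats 1000000 in
-- the binary-search lookup returns exactly what A's alias cascade returns, for every key
theorem lookup_eq_cascade (n : List Char) :
    pv_lookup_staff_role n =
      (if n = "ceo".toList then some "ceo"
       else if n = "analista".toList then some "analyst"
       else if n = "coach".toList then some "coach"
       else if n = "segundo manager".toList then some "second_manager"
       else if n = "manager".toList then some "manager"
       else if n = "capitan".toList ∨ n = "captain".toList then some "captain"
       else none) := by
  by_cases h1 : n = "ceo".toList
  · subst h1; decide
  by_cases h2 : n = "analista".toList
  · subst h2; decide
  by_cases h3 : n = "coach".toList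
  · subst h3; decide
  by_cases h4 : n = "segundo manager".toList
  · subst h4; decide
  by_cases h5 : n = "manager".toList
  · subst h5; decide
  by_cases h6 : n = "capitan".toList
  · subst h6; decide
  by_cases h7 : n = "captain".toList
  · subst h7; decide
  -- n is none of the aliases: the cascade gives none …
  rw [if_neg h1, if_neg h2, if_neg h3, if_neg h4, if_neg h5,
      if_neg (by tauto : ¬(n = "capitan".toList ∨ n = "captain".toList))]
  -- … and so does the lookup: whatever index the bisection returns, its key differs from n
  have hkey : ∀ p ∈ pvStaffTable, p.1 ≠ n := by
    intro p hp
    simp only [pvStaffTable, List.mem_cons, List.not_mem_nil, or_false] at hp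
    rcases hp with h | h | h | h | h | h | h <;> subst h <;> intro e
    · exact h2 e.symm
    · exact h6 e.symm
    · exact h7 e.symm
    · exact h1 e.symm
    · exact h3 e.symm
    · exact h5 e.symm
    · exact h4 e.symm
  unfold pv_lookup_staff_role
  by_cases hlo : pvBisectAux pvStaffTable.length n 0 pvStaffTable.length < pvStaffTable.length
  · rw [if_pos hlo]
    have hmem : pvStaffTable.getD (pvBisectAux pvStaffTable.length n 0 pvStaffTable.length) ([], "") ∈ pvStaffTable := by
      rw [List.getD_eq_getElem _ _ hlo]; exact List.getElem_mem _
    rw [if_neg (hkey _ hmem)]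
  · rw [if_neg hlo]

-- ===== VERDICT (by name: the statement is the Claim_ definition above) =====
theorem normalize_team_staff_role_name_py_spec : Claim_equal_normalize_team_staff_role_name_py := by
  intro role_name _
  unfold Spec_normalize_team_staff_role_name_py normalize_team_staff_role_name_py
    normalize_team_staff_role_name_py_alt
  simp only [lookup_eq_cascade]
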